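-- pv_equiv track=rewrite | github.com/Aasthaengg/IBMdataset | Python_codes/p03618/s590649914.py | solve
-- ===== SOURCE A (Python) =====
-- import collections
--
-- def solve(A):
--     counter = collections.Counter()
--     ans = 1
--     for i, a in enumerate(A):
--         c = counter[a] if a in counter else 0
--         ans += i - c
--         counter.update([a])
--     return ans
-- ===== SOURCE B (Python) =====
-- import collections
--
-- def solve(A):
--     freq = collections.Counter(A)
--     n = sum(freq.values())
--     return 1 + n * (n - 1) // 2 - sum(c * (c - 1) // 2 for c in freq.values())
-- ===== Notes on version B (the rewrite author's own statement) =====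
-- stated objective: faster
-- what changed: Replaces A's per-element running accumulator (adding i minus the count of earlier equal elements at each step) with a single Counter tally followed by the closed form 1 + n*(n-1)//2 - sum(c*(c-1)//2 over counts).
import Mathlib
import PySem

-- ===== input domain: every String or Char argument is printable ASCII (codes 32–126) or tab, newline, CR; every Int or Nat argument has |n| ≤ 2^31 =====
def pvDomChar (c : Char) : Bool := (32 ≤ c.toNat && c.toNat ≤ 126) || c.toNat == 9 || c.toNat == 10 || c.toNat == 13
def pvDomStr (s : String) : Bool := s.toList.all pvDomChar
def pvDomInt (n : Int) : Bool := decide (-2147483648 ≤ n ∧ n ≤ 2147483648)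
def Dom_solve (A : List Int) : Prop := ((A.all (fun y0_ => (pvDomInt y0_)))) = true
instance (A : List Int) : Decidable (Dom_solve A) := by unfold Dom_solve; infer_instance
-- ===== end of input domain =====

-- B replaces A's running accumulator with a full Counter tally and the closed form
-- 1 + n*(n-1)//2 - sum(c*(c-1)//2); same O(n) cost, different algorithm.

-- ===== PORT A =====
def solve (A : List Int) : Int :=
  ((PySem.List.enumerate A 0).foldl
    (fun st p =>
      let c : Int := if st.2.contains p.2 then st.2.getD p.2 0 else 0
      (st.1 + p.1 - c, st.2.modify p.2 0 (fun x => x + 1)))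
    ((1 : Int), (PySem.Dict.empty : PySem.Dict Int Int))).1

-- ===== PORT B =====
def solve_alt (A : List Int) : Int :=
  let freq := PySem.Dict.counter A
  let n : Int := freq.values.sum
  1 + PySem.Int.floordiv (n * (n - 1)) 2
    - (freq.values.map (fun c => PySem.Int.floordiv (c * (c - 1)) 2)).sum

-- ===== PRECONDITION & SPEC =====
def Spec_solve (A : List Int) (out : Int) : Prop := out = solve_alt A
instance (A : List Int) (out : Int) : Decidable (Spec_solve A out) := by unfold Spec_solve; infer_instance

-- ===== CLAIM (what is proved, stated in full; the proofs are below) =====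
def Claim_equal_solve : Prop := ∀ (A : List Int), Dom_solve A → Spec_solve A (solve A)

-- ===== LEMMAS AND PROOFS =====

-- A's loop body as a named step function (solve's fold is definitionally a fold of stepA)
def stepA (st : Int × PySem.Dict Int Int) (p : Int × Int) : Int × PySem.Dict Int Int :=
  let c : Int := if st.2.contains p.2 then st.2.getD p.2 0 else 0
  (st.1 + p.1 - c, st.2.modify p.2 0 (fun x => x + 1))

lemma solve_eq_foldA (A : List Int) :
    solve A = ((PySem.List.enumerate A 0).foldl stepA
      ((1 : Int), (PySem.Dict.empty : PySem.Dict Int Int))).1 := rfl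

lemma snd_foldA (l : List Int) : ∀ (s : Int) (st : Int × PySem.Dict Int Int),
    ((PySem.List.enumerate l s).foldl stepA st).2
      = l.foldl (fun d x => d.modify x 0 (fun y => y + 1)) st.2 := by
  induction l with
  | nil => intro s st; simp [PySem.List.enumerate_nil]
  | cons a l ih =>
    intro s st
    rw [PySem.List.enumerate_cons, List.foldl_cons, List.foldl_cons, ih]
    rfl

lemma solve_append (l : List Int) (a : Int) :
    solve (l ++ [a]) = solve l + (l.length : Int) - (l.count a : Int) := by
  have hd : ((PySem.List.enumerate l 0).foldl stepA
      ((1 : Int), (PySem.Dict.empty : PySem.Dict Int Int))).2 = PySem.Dict.counter l := by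
    rw [snd_foldA, PySem.Dict.counter_eq_foldl]
  have hc : (if (PySem.Dict.counter l).contains a then (PySem.Dict.counter l).getD a 0 else 0)
      = (l.count a : Int) := by
    rw [PySem.Dict.contains_counter, PySem.Dict.getD_counter]
    by_cases h : a ∈ l
    · simp [h]
    · simp [h, List.count_eq_zero_of_not_mem h]
  rw [solve_eq_foldA, solve_eq_foldA, PySem.List.enumerate_append, List.foldl_append]
  simp only [PySem.List.enumerate_cons, PySem.List.enumerate_nil, List.foldl_cons, List.foldl_nil]
  rw [show (stepA ((PySem.List.enumerate l 0).foldl stepA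
      ((1 : Int), (PySem.Dict.empty : PySem.Dict Int Int))) (0 + (l.length : Int), a)).1
      = ((PySem.List.enumerate l 0).foldl stepA
      ((1 : Int), (PySem.Dict.empty : PySem.Dict Int Int))).1 + (0 + (l.length : Int))
      - (if (((PySem.List.enumerate l 0).foldl stepA
          ((1 : Int), (PySem.Dict.empty : PySem.Dict Int Int))).2).contains a
         then (((PySem.List.enumerate l 0).foldl stepA
          ((1 : Int), (PySem.Dict.empty : PySem.Dict Int Int))).2).getD a 0 else 0) from rfl]
  rw [hd, hc]
  ring

def Tm (x : Int) : Int := x * (x - 1)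

def cntSum (l : List Int) : Int := ∑ v ∈ l.toFinset, Tm ((l.count v : Int))

lemma cntSum_append (l : List Int) (a : Int) :
    cntSum (l ++ [a]) = cntSum l + 2 * (l.count a : Int) := by
  by_cases h : a ∈ l
  · have ht : (l ++ [a]).toFinset = l.toFinset := by
      rw [List.toFinset_append]
      simp [Finset.insert_eq_self.mpr (List.mem_toFinset.mpr h)]
    have hmem : a ∈ l.toFinset := List.mem_toFinset.mpr h
    rw [cntSum, cntSum, ht, Finset.sum_eq_sum_diff_singleton_add hmem,
      Finset.sum_eq_sum_diff_singleton_add hmem (fun v => Tm ((l.count v : Int)))]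
    have hoff : ∑ x ∈ l.toFinset \ {a}, Tm (((l ++ [a]).count x : Int))
        = ∑ x ∈ l.toFinset \ {a}, Tm ((l.count x : Int)) := by
      refine Finset.sum_congr rfl (fun x hx => ?_)
      have hxa : x ≠ a := by
        rcases Finset.mem_sdiff.mp hx with ⟨_, hx2⟩
        simpa using hx2
      rw [List.count_append]
      simp [(Ne.symm hxa : a ≠ x)]
    have hca : ((l ++ [a]).count a : Int) = (l.count a : Int) + 1 := by
      rw [List.count_append]
      simp
    rw [hoff, hca]
    unfold Tm
    ring
  · have ht : (l ++ [a]).toFinset = insert a l.toFinset := by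
      rw [List.toFinset_append]
      simp
    rw [cntSum, cntSum, ht, Finset.sum_insert (by simp [h])]
    have hca : ((l ++ [a]).count a : Int) = 1 := by
      rw [List.count_append]
      simp [List.count_eq_zero_of_not_mem h]
    have hoff : ∑ x ∈ l.toFinset, Tm (((l ++ [a]).count x : Int))
        = ∑ x ∈ l.toFinset, Tm ((l.count x : Int)) := by
      refine Finset.sum_congr rfl (fun x hx => ?_)
      have hxa : x ≠ a := by
        intro he; exact h (he ▸ List.mem_toFinset.mp hx)
      rw [List.count_append]
      simp [(Ne.symm hxa : a ≠ x)]
    rw [hca, hoff, List.count_eq_zero_of_not_mem h]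
    unfold Tm
    ring

lemma two_mul_solve (l : List Int) :
    2 * solve l = 2 + (l.length : Int) * ((l.length : Int) - 1) - cntSum l := by
  induction l using List.reverseRecOn with
  | nil => simp [solve, PySem.List.enumerate_nil, cntSum]
  | append_singleton l a ih =>
    rw [solve_append, cntSum_append]
    simp only [List.length_append, List.length_singleton]
    push_cast
    push_cast at ih
    linear_combination ih

lemma even_mul_pred (x : Int) : ∃ m, x * (x - 1) = 2 * m := by
  rcases Int.even_mul_succ_self (x - 1) with ⟨m, hm⟩
  exact ⟨m, by linear_combination hm⟩

lemma floordiv_half (x : Int) : 2 * PySem.Int.floordiv (x * (x - 1)) 2 = x * (x - 1) := by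
  obtain ⟨m, hm⟩ := even_mul_pred x
  rw [PySem.Int.floordiv_eq_ediv_of_pos (by norm_num), hm]
  omega

lemma half_sum (vals : List Int) :
    2 * (vals.map (fun c => PySem.Int.floordiv (c * (c - 1)) 2)).sum
      = (vals.map (fun c => c * (c - 1))).sum := by
  induction vals with
  | nil => simp
  | cons x xs ih =>
    rw [List.map_cons, List.sum_cons, List.map_cons, List.sum_cons, mul_add, ih, floordiv_half]

lemma values_counter (A : List Int) :
    (PySem.Dict.counter A).values = (PySem.Set.ofList A).map (fun k => ((A.count k : Nat) : Int)) := by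
  show ((PySem.Dict.counter A).items).map Prod.snd = _
  rw [PySem.Dict.items_counter, List.map_map]
  rfl

lemma toFinset_ofList (A : List Int) : (PySem.Set.ofList A).toFinset = A.toFinset := by
  ext v
  simp [List.mem_toFinset, PySem.Set.mem_ofList]

lemma sum_map_values (A : List Int) (f : Int → Int) :
    ((PySem.Dict.counter A).values.map f).sum = ∑ v ∈ A.toFinset, f ((A.count v : Nat) : Int) := by
  rw [values_counter, List.map_map, ← toFinset_ofList A,
    List.sum_toFinset _ (PySem.Set.nodup_ofList A)]
  rfl

lemma values_sum_len (A : List Int) :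
    (PySem.Dict.counter A).values.sum = (A.length : Int) := by
  have h0 : (PySem.Dict.counter A).values.sum
      = ((PySem.Dict.counter A).values.map id).sum := by simp
  rw [h0, sum_map_values A id]
  have h1 : A.toFinset.sum (fun v => A.count v)
      = (A.dedup.map (fun v => A.count v)).sum := by
    have hdt : A.dedup.toFinset = A.toFinset := by
      ext v; simp
    rw [← hdt]
    exact List.sum_toFinset _ (List.nodup_dedup A)
  have h2 := List.sum_map_count_dedup_eq_length A
  have h3 : A.toFinset.sum (fun v => A.count v) = A.length := by rw [h1, h2]
  calc ∑ v ∈ A.toFinset, id ((A.count v : Nat) : Int)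
      = ((∑ v ∈ A.toFinset, A.count v : Nat) : Int) := by push_cast; rfl
    _ = (A.length : Int) := by rw [h3]

lemma two_mul_solve_alt (A : List Int) :
    2 * solve_alt A = 2 + (A.length : Int) * ((A.length : Int) - 1) - cntSum A := by
  have hn := values_sum_len A
  have hs : ((PySem.Dict.counter A).values.map (fun c => c * (c - 1))).sum = cntSum A := by
    rw [sum_map_values A (fun c => c * (c - 1))]
    unfold cntSum Tm
    rfl
  have h4 := floordiv_half ((A.length : Int))
  have h5 := half_sum ((PySem.Dict.counter A).values)
  simp only [solve_alt]
  rw [hn]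
  linear_combination h4 - h5 - hs

-- ===== VERDICT (by name: the statement is the Claim_ definition above) =====
theorem solve_spec : Claim_equal_solve := by
  intro A _
  unfold Spec_solve
  have h1 := two_mul_solve A
  have h2 := two_mul_solve_alt A
  omega
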